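-- pv_equiv track=rewrite | github.com/reypader/trello-export-parser | markdown_formatter.py | get_ordered_teams
-- ===== SOURCE A (Python) =====
-- from typing import List, Dict, Any, Optional
--
-- def get_ordered_teams(teams: Dict[str, List[Dict[str, Any]]]) -> List[str]:
--     """
--     Get team names in the desired order: TMM first, SRE second, then the rest alphabetically
--
--     Args:
--         teams: Dictionary with team names as keys and lists of cards as values
--
--     Returns:
--         List of team names in the desired order
--     """
--     ordered_teams = []
--
--     # Add TMM first if it exists
--     if "TMM" in teams:
--         ordered_teams.append("TMM")
--
--     # Add SRE second if it exists
--     if "SRE" in teams: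
--         ordered_teams.append("SRE")
--
--     # Add the rest of the teams alphabetically
--     remaining_teams = sorted([team for team in teams.keys() if team not in ["TMM", "SRE"]])
--     ordered_teams.extend(remaining_teams)
--
--     return ordered_teams
-- ===== SOURCE B (Python) =====
-- def get_ordered_teams(teams):
--     return sorted(teams, key=lambda t: (0 if t == "TMM" else 1 if t == "SRE" else 2, t))
-- ===== Notes on version B (the rewrite author's own statement) =====
-- stated objective: simpler
-- what changed: Replaces the append-two-specials-then-filter-and-sort-the-rest body with a single sorted() over the keys using a (priority, name) tuple key.
import Mathlib
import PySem

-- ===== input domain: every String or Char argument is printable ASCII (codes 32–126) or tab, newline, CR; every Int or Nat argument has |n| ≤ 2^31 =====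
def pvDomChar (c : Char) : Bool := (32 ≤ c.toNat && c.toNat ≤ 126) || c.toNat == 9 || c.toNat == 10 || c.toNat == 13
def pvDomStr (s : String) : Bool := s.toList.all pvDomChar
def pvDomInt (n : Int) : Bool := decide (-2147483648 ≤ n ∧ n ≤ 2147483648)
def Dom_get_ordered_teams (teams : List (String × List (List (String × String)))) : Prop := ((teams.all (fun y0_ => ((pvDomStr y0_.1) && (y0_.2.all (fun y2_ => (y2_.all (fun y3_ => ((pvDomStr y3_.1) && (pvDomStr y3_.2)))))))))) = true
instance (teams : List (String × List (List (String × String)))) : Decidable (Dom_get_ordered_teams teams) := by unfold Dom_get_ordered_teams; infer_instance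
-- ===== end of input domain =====

-- B replaces A's append-the-two-specials-then-filter-and-sort-the-rest body with one
-- sorted() over the keys using a (priority, name) tuple key; objective: simpler.

-- ===== PORT A =====
def get_ordered_teams (teams : List (String × List (List (String × String)))) : List String :=
  -- the dict's keys (first occurrences, insertion order)
  let keys := PySem.Set.ofList (teams.map (·.1))
  -- Add TMM first if it exists
  let ordered₁ := if "TMM" ∈ keys then ["TMM"] else []
  -- Add SRE second if it exists
  let ordered₂ := if "SRE" ∈ keys then ordered₁ ++ ["SRE"] else ordered₁
  -- Add the rest of the teams alphabetically
  let remaining := PySem.List.sorted (keys.filter (fun t => !decide (t = "TMM" ∨ t = "SRE"))) (fun t => t) false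
  ordered₂ ++ remaining

-- ===== PORT B =====
-- priority component of B's tuple key
def pvPrio (t : String) : Int := if t = "TMM" then 0 else if t = "SRE" then 1 else 2

def get_ordered_teams_alt (teams : List (String × List (List (String × String)))) : List String :=
  PySem.List.sorted2 (PySem.Set.ofList (teams.map (·.1))) pvPrio (fun t => t) false

-- ===== PRECONDITION & SPEC =====
def Spec_get_ordered_teams (teams : List (String × List (List (String × String)))) (out : List String) : Prop := out = get_ordered_teams_alt teams
instance (teams : List (String × List (List (String × String)))) (out : List String) : Decidable (Spec_get_ordered_teams teams out) := by unfold Spec_get_ordered_teams; infer_instance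

-- ===== CLAIM (what is proved, stated in full; the proofs are below) =====
def Claim_equal_get_ordered_teams : Prop := ∀ (teams : List (String × List (List (String × String)))), Dom_get_ordered_teams teams → Spec_get_ordered_teams teams (get_ordered_teams teams)

-- ===== LEMMAS AND PROOFS =====

-- the weak lexicographic order B sorts by
def pvLexR (a b : String) : Prop := pvPrio a < pvPrio b ∨ (pvPrio a = pvPrio b ∧ a ≤ b)

-- the Bool comparison sorted2 inserts with (k1 = pvPrio, k2 = id, reverse = false)
def pvLtb (a b : String) : Bool :=
  decide (pvPrio a < pvPrio b) || (!decide (pvPrio b < pvPrio a) && decide (a < b))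

theorem pvLexR_total (a b : String) : pvLexR a b ∨ pvLexR b a := by
  unfold pvLexR
  rcases lt_trichotomy (pvPrio a) (pvPrio b) with h | h | h
  · exact Or.inl (Or.inl h)
  · rcases le_total a b with h2 | h2
    · exact Or.inl (Or.inr ⟨h, h2⟩)
    · exact Or.inr (Or.inr ⟨h.symm, h2⟩)
  · exact Or.inr (Or.inl h)

theorem pvLexR_trans (a b c : String) : pvLexR a b → pvLexR b c → pvLexR a c := by
  unfold pvLexR
  rintro (h1 | ⟨h1, h1'⟩) (h2 | ⟨h2, h2'⟩)
  · exact Or.inl (h1.trans h2)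
  · exact Or.inl (h2 ▸ h1)
  · exact Or.inl (h1 ▸ h2)
  · exact Or.inr ⟨h1.trans h2, h1'.trans h2'⟩

theorem pvLexR_antisymm (a b : String) : pvLexR a b → pvLexR b a → a = b := by
  unfold pvLexR
  rintro (h1 | ⟨h1, h1'⟩) (h2 | ⟨h2, h2'⟩) <;> first
    | exact absurd h1 (by omega)
    | exact le_antisymm h1' h2'

theorem pvLtb_true_iff (a b : String) : pvLtb a b = true ↔ ¬ pvLexR b a := by
  unfold pvLtb pvLexR
  simp only [Bool.or_eq_true, Bool.and_eq_true, Bool.not_eq_eq_eq_not, Bool.not_true,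
    decide_eq_true_eq, decide_eq_false_iff_not, not_or, not_and, not_lt]
  constructor
  · rintro (h | ⟨h, h'⟩)
    · exact ⟨le_of_lt h, fun he => absurd h (by omega)⟩
    · exact ⟨h, fun _ => not_le_of_gt h'⟩
  · rintro ⟨h, h'⟩
    rcases lt_or_eq_of_le h with hlt | heq
    · exact Or.inl hlt
    · exact Or.inr ⟨le_of_eq heq, lt_of_not_ge (h' heq.symm)⟩

theorem pvInsertBy_pairwise (x : String) (ys : List String) (h : ys.Pairwise pvLexR) :
    (PySem.List.insertBy pvLtb x ys).Pairwise pvLexR := by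
  induction ys with
  | nil => simp [PySem.List.insertBy]
  | cons y ys ih =>
    rcases List.pairwise_cons.mp h with ⟨hy, hys⟩
    by_cases hb : pvLtb x y = true
    · have hxy : pvLexR x y :=
        (pvLexR_total x y).resolve_right (fun hr => (pvLtb_true_iff x y).mp hb hr)
      simp only [PySem.List.insertBy, hb, if_pos]
      refine List.pairwise_cons.mpr ⟨?_, h⟩
      intro z hz
      rcases List.mem_cons.mp hz with rfl | hz
      · exact hxy
      · exact pvLexR_trans _ _ _ hxy (hy z hz)
    · have hyx : pvLexR y x := by
        by_contra hc
        exact hb ((pvLtb_true_iff x y).mpr hc)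
      simp only [PySem.List.insertBy, hb, if_neg, Bool.false_eq_true, not_false_iff]
      refine List.pairwise_cons.mpr ⟨?_, ih hys⟩
      intro z hz
      rcases (PySem.List.mem_insertBy pvLtb x z ys).mp hz with rfl | hz
      · exact hyx
      · exact hy z hz

theorem pvFoldl_pairwise (xs acc : List String) (h : acc.Pairwise pvLexR) :
    (xs.foldl (fun acc x => PySem.List.insertBy pvLtb x acc) acc).Pairwise pvLexR := by
  induction xs generalizing acc with
  | nil => exact h
  | cons x xs ih => exact ih _ (pvInsertBy_pairwise x acc h)

theorem pvSorted2_eq_foldl (xs : List String) :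
    PySem.List.sorted2 xs pvPrio (fun t => t) false =
      xs.foldl (fun acc x => PySem.List.insertBy pvLtb x acc) [] := rfl

theorem pvSorted2_pairwise (xs : List String) :
    (PySem.List.sorted2 xs pvPrio (fun t => t) false).Pairwise pvLexR := by
  rw [pvSorted2_eq_foldl]
  exact pvFoldl_pairwise xs [] List.Pairwise.nil

theorem pvMain (teams : List (String × List (List (String × String)))) :
    get_ordered_teams teams = get_ordered_teams_alt teams := by
  unfold get_ordered_teams get_ordered_teams_alt
  set keys := PySem.Set.ofList (teams.map (·.1)) with hkeys
  have hnd : keys.Nodup := PySem.Set.nodup_ofList _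
  set p : String → Bool := fun t => decide (t = "TMM" ∨ t = "SRE") with hp
  set rest := PySem.List.sorted (keys.filter (fun t => !p t)) (fun t => t) false with hrestdef
  set pre : List String :=
    (if "SRE" ∈ keys then (if "TMM" ∈ keys then ["TMM"] else []) ++ ["SRE"]
     else (if "TMM" ∈ keys then ["TMM"] else [])) with hpredef
  show pre ++ rest = PySem.List.sorted2 keys pvPrio (fun t => t) false
  have hrest_mem : ∀ t ∈ rest, t ≠ "TMM" ∧ t ≠ "SRE" := by
    intro t ht
    rw [hrestdef, PySem.List.mem_sorted, List.mem_filter] at ht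
    have h2 := ht.2
    simp only [hp, Bool.not_eq_eq_eq_not, Bool.not_true, decide_eq_false_iff_not, not_or] at h2
    exact h2
  have hpre_mem : ∀ t ∈ pre, t = "TMM" ∨ t = "SRE" := by
    intro t ht
    rw [hpredef] at ht
    split_ifs at ht <;>
      simp only [List.mem_append, List.mem_cons, List.not_mem_nil, or_false,
        List.nil_append] at ht <;> tauto
  -- left-hand side is pairwise pvLexR
  have hpw : (pre ++ rest).Pairwise pvLexR := by
    rw [List.pairwise_append]
    refine ⟨?_, ?_, ?_⟩
    · rw [hpredef]
      split_ifs <;>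
        simp [List.pairwise_cons, pvLexR, pvPrio]
    · have h1 : rest.Pairwise (fun a b : String => a ≤ b) := by
        have := PySem.List.sorted_pairwise (keys.filter (fun t => !p t)) (fun t : String => t)
        simpa [hrestdef] using this
      refine h1.imp_of_mem ?_
      intro a b ha hb hle
      rcases hrest_mem a ha with ⟨ha1, ha2⟩
      rcases hrest_mem b hb with ⟨hb1, hb2⟩
      exact Or.inr ⟨by simp [pvPrio, ha1, ha2, hb1, hb2], hle⟩
    · intro a ha b hb
      rcases hrest_mem b hb with ⟨hb1, hb2⟩
      refine Or.inl ?_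
      rcases hpre_mem a ha with rfl | rfl <;> simp [pvPrio, hb1, hb2]
  -- left-hand side is a permutation of keys
  have hperm : (pre ++ rest).Perm keys := by
    have h1 : (keys.filter p ++ keys.filter (fun t => !p t)).Perm keys :=
      List.filter_append_perm p keys
    have h2 : rest.Perm (keys.filter (fun t => !p t)) := by
      rw [hrestdef]; exact PySem.List.sorted_perm _ _ _
    have h3 : pre.Perm (keys.filter p) := by
      have hnd1 : pre.Nodup := by
        rw [hpredef]; split_ifs <;> simp
      have hnd2 : (keys.filter p).Nodup := hnd.filter p
      rw [List.perm_ext_iff_of_nodup hnd1 hnd2]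
      intro x
      rw [List.mem_filter, hp]
      simp only [decide_eq_true_eq]
      rw [hpredef]
      constructor
      · intro hx
        split_ifs at hx with h4 h5 h6 <;>
          simp only [List.mem_append, List.mem_cons, List.not_mem_nil, or_false,
            List.nil_append] at hx
        · rcases hx with rfl | rfl
          · exact ⟨h5, Or.inl rfl⟩
          · exact ⟨h4, Or.inr rfl⟩
        · subst hx; exact ⟨h4, Or.inr rfl⟩
        · subst hx; exact ⟨h6, Or.inl rfl⟩
      · rintro ⟨hxk, rfl | rfl⟩ <;> split_ifs with h4 h5 <;>
          simp only [List.mem_append, List.mem_cons, List.not_mem_nil, or_false,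
            List.nil_append] <;> tauto
    exact (h3.append h2).trans h1
  -- right-hand side: permutation of keys and pairwise pvLexR
  have hperm' : (PySem.List.sorted2 keys pvPrio (fun t => t) false).Perm keys :=
    PySem.List.sorted2_perm keys pvPrio (fun t => t) false
  have hpw' : (PySem.List.sorted2 keys pvPrio (fun t => t) false).Pairwise pvLexR :=
    pvSorted2_pairwise keys
  exact List.Perm.eq_of_pairwise (fun a b _ _ h1 h2 => pvLexR_antisymm a b h1 h2)
    hpw hpw' (hperm.trans hperm'.symm)

-- ===== VERDICT (by name: the statement is the Claim_ definition above) =====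
theorem get_ordered_teams_spec : Claim_equal_get_ordered_teams := by
  intro teams _
  exact pvMain teams
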